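-- pv_equiv track=rewrite | github.com/kevincao91/Anchor-KMeans | EDA of bbox.py | _compute_losses
-- ===== SOURCE A (Python) =====
-- def _compute_losses(sides, input_sides):
--     loss=0
--     for side in sides:
--         length = []
--         for input_side in input_sides:
--             length.append((input_side-side)**2)
--         loss += min(length)
--
--     return loss
-- ===== SOURCE B (Python) =====
-- def _bisect_left(a, x, lo, hi):
--     # recursive binary search: insertion point of x in sorted a within [lo, hi)
--     if lo < hi:
--         mid = (lo + hi) // 2
--         if a[mid] < x:
--             return _bisect_left(a, x, mid + 1, hi)
--         return _bisect_left(a, x, lo, mid)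
--     return lo
--
--
-- def _compute_losses(sides, input_sides):
--     srt = sorted(input_sides)
--     m = len(srt)
--     loss = 0
--     for side in sides:
--         i = _bisect_left(srt, side, 0, m)
--         if i == 0:
--             d = (srt[0] - side) ** 2
--         elif i == m:
--             d = (srt[m - 1] - side) ** 2
--         else:
--             d = min((srt[i - 1] - side) ** 2, (srt[i] - side) ** 2)
--         loss += d
--     return loss
-- ===== Notes on version B (the rewrite author's own statement) =====
-- stated objective: faster
-- what changed: B sorts input_sides once and finds each side's nearest neighbour by binary search instead of scanning all input_sides per side.
-- outside the precondition, e.g. on _compute_losses([1], []): A raises ValueError, B raises IndexError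
import Mathlib
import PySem

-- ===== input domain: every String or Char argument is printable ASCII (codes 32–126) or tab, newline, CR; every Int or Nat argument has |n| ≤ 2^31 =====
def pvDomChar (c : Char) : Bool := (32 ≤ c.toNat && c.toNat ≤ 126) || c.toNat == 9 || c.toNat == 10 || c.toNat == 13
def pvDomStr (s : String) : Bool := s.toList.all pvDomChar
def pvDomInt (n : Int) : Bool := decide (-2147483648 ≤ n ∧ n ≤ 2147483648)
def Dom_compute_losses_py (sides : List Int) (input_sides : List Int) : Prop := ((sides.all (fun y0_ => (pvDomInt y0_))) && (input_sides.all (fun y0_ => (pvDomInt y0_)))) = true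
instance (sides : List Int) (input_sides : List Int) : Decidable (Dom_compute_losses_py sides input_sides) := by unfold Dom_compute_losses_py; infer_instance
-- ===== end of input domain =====

-- B sorts input_sides once and binary-searches each side's nearest neighbour instead of
-- scanning all of input_sides per side (objective: faster, O(n*m) -> O((n+m) log m)).

-- ===== PORT A =====
-- literal port of A: for each side, build the list of squared distances and add its min;
-- Python's min raises on an empty list (min? = none there), so Pre_ excludes input_sides = [].
def compute_losses_py (sides : List Int) (input_sides : List Int) : Int :=
  sides.foldl (fun loss side =>
    loss + (PySem.List.min? (input_sides.map (fun input_side => (input_side - side) ^ 2))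
             (fun y => y)).getD 0) 0

-- ===== PORT B =====
-- port of Source B's hand-written recursive _bisect_left; a[mid] is always in range in every
-- call the entry function makes (lo < hi ≤ len a), so getD's default is never used.
-- fuel = hi - lo only bounds the recursion depth so the definition is structural
-- (kernel-reducible); it never changes the computed value (pvBisectAux_eq below).
def pvBisectAux (a : List Int) (x : Int) : Nat → Nat → Nat → Nat
  | lo, hi, fuel + 1 =>
    if lo < hi then
      let mid := (lo + hi) / 2
      if a.getD mid 0 < x then pvBisectAux a x (mid + 1) hi fuel
      else pvBisectAux a x lo mid fuel
    else lo
  | lo, _, 0 => lo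

def pvBisect (a : List Int) (x : Int) (lo hi : Nat) : Nat :=
  pvBisectAux a x lo hi (hi - lo)

-- the loop body of Source B: squared distance from side to its nearest neighbour in sorted srt;
-- the indices srt[0], srt[m-1], srt[i-1], srt[i] are in range whenever srt ≠ [] (Pre_).
def pvBest (srt : List Int) (side : Int) : Int :=
  let m := srt.length
  let i := pvBisect srt side 0 m
  if i = 0 then (srt.getD 0 0 - side) ^ 2
  else if i = m then (srt.getD (m - 1) 0 - side) ^ 2
  else min ((srt.getD (i - 1) 0 - side) ^ 2) ((srt.getD i 0 - side) ^ 2)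

def compute_losses_py_alt (sides : List Int) (input_sides : List Int) : Int :=
  let srt := PySem.List.sorted input_sides (fun y => y)
  sides.foldl (fun loss side => loss + pvBest srt side) 0

-- ===== PRECONDITION & SPEC =====
-- Python A raises ValueError (min of an empty sequence) when input_sides is empty and sides is
-- not; Pre_ excludes empty input_sides (B raises IndexError there too).
def Pre_compute_losses_py (sides : List Int) (input_sides : List Int) : Prop :=
  input_sides ≠ []
instance (sides : List Int) (input_sides : List Int) : Decidable (Pre_compute_losses_py sides input_sides) := by unfold Pre_compute_losses_py; infer_instance

def pvWitness_compute_losses_py : List Int × List Int := ([3, -1], [0, 2, 2])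

def Spec_compute_losses_py (sides : List Int) (input_sides : List Int) (out : Int) : Prop := out = compute_losses_py_alt sides input_sides
instance (sides : List Int) (input_sides : List Int) (out : Int) : Decidable (Spec_compute_losses_py sides input_sides out) := by unfold Spec_compute_losses_py; infer_instance

-- ===== CLAIM (what is proved, stated in full; the proofs are below) =====
def Claim_equal_compute_losses_py : Prop := ∀ (sides : List Int) (input_sides : List Int), Dom_compute_losses_py sides input_sides → Pre_compute_losses_py sides input_sides → Spec_compute_losses_py sides input_sides (compute_losses_py sides input_sides)

-- ===== LEMMAS AND PROOFS =====

-- the recursive binary search returns any c that characterises the predicate "< x" by position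
theorem pvBisectAux_eq (a : List Int) (x : Int) (c : Nat)
    (hchar : ∀ j, j < a.length → (a.getD j 0 < x ↔ j < c)) :
    ∀ (fuel lo hi : Nat), hi - lo ≤ fuel → hi ≤ a.length → lo ≤ c → c ≤ hi →
      pvBisectAux a x lo hi fuel = c := by
  intro fuel
  induction fuel with
  | zero => intro lo hi hf h1 h2 h3; simp only [pvBisectAux]; omega
  | succ fuel ih =>
    intro lo hi hf h1 h2 h3
    simp only [pvBisectAux]
    split
    · rename_i h
      have hm : (lo + hi) / 2 < a.length := by omega
      by_cases hlt : a.getD ((lo + hi) / 2) 0 < x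
      · rw [if_pos hlt]
        exact ih _ _ (by omega) h1 (by have := (hchar _ hm).mp hlt; omega) h3
      · rw [if_neg hlt]
        refine ih lo _ (by omega) (by omega) h2 ?_
        have := (hchar _ hm)
        by_cases hc : c ≤ (lo + hi) / 2
        · exact hc
        · exact absurd (this.mpr (by omega)) hlt
    · omega

theorem pvBisect_eq (a : List Int) (x : Int) (c : Nat)
    (hchar : ∀ j, j < a.length → (a.getD j 0 < x ↔ j < c))
    (lo hi : Nat) (h1 : hi ≤ a.length) (h2 : lo ≤ c) (h3 : c ≤ hi) :
    pvBisect a x lo hi = c :=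
  pvBisectAux_eq a x c hchar (hi - lo) lo hi le_rfl h1 h2 h3

-- in a sorted list, "element < x" holds exactly on the first countP-many positions
theorem sorted_char (a : List Int) (hs : a.Pairwise (· ≤ ·)) (x : Int) :
    ∀ j, j < a.length → (a.getD j 0 < x ↔ j < a.countP (fun t => decide (t < x))) := by
  induction a with
  | nil => intro j hj; simp at hj
  | cons y t ih =>
    rcases List.pairwise_cons.mp hs with ⟨hy, ht⟩
    intro j hj
    by_cases hyx : y < x
    · have hc : (y :: t).countP (fun t => decide (t < x)) = t.countP (fun t => decide (t < x)) + 1 := by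
        simp [hyx]
      cases j with
      | zero => simpa [hc] using hyx
      | succ j =>
        have := ih ht j (by simpa using hj)
        simpa [hc, List.getD_cons_succ] using this
    · have hc : (y :: t).countP (fun t => decide (t < x)) = 0 := by
        rw [List.countP_eq_zero]
        intro z hz
        simp only [decide_eq_true_eq]
        rcases List.mem_cons.mp hz with rfl | hz'
        · exact hyx
        · exact fun h => hyx (lt_of_le_of_lt (hy z hz') h)
      cases j with
      | zero => simpa [hc] using hyx
      | succ j =>
        have hge : x ≤ t.getD j 0 := by
          have hjt : j < t.length := by simpa using hj
          have : y ≤ t.getD j 0 := by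
            rw [List.getD_eq_getElem _ _ hjt]
            exact hy _ (List.getElem_mem hjt)
          omega
        simp only [List.getD_cons_succ, hc]
        constructor
        · intro h; omega
        · intro h; omega

-- min of a nonempty list equals any member that is a lower bound
theorem min_getD_eq (xs : List Int) (hne : xs ≠ []) (d : Int)
    (hmem : d ∈ xs) (hle : ∀ y ∈ xs, d ≤ y) :
    (PySem.List.min? xs (fun y => y)).getD 0 = d := by
  cases hm : PySem.List.min? xs (fun y => y) with
  | none => exact absurd ((PySem.List.min?_eq_none_iff _ _).mp hm) hne
  | some m =>
  rw [Option.getD_some]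
  exact le_antisymm (PySem.List.min?_isMin hm d hmem) (hle m (PySem.List.min?_mem hm))

-- getD-phrased index monotonicity for a pairwise-≤ list
theorem getD_mono (a : List Int) (hs : a.Pairwise (· ≤ ·))
    {p q : Nat} (hpq : p ≤ q) (hq : q < a.length) :
    a.getD p 0 ≤ a.getD q 0 := by
  rcases Nat.lt_or_ge p q with h | h
  · rw [List.getD_eq_getElem _ _ (by omega), List.getD_eq_getElem _ _ hq]
    exact List.pairwise_iff_getElem.mp hs p q (by omega) hq h
  · have : p = q := by omega
    subst this; rfl

-- squared distances: if s ≤ a ≤ b then (a-s)^2 ≤ (b-s)^2, and if b ≤ a ≤ s then same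
theorem sq_mono_right (s a b : Int) (h1 : s ≤ a) (h2 : a ≤ b) : (a - s) ^ 2 ≤ (b - s) ^ 2 := by
  nlinarith
theorem sq_mono_left (s a b : Int) (h1 : a ≤ s) (h2 : b ≤ a) : (a - s) ^ 2 ≤ (b - s) ^ 2 := by
  nlinarith

-- pvBest with its lets zeta-reduced
theorem pvBest_def (srt : List Int) (side : Int) :
    pvBest srt side =
      (if pvBisect srt side 0 srt.length = 0 then (srt.getD 0 0 - side) ^ 2
       else if pvBisect srt side 0 srt.length = srt.length then
         (srt.getD (srt.length - 1) 0 - side) ^ 2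
       else min ((srt.getD (pvBisect srt side 0 srt.length - 1) 0 - side) ^ 2)
                ((srt.getD (pvBisect srt side 0 srt.length) 0 - side) ^ 2)) := rfl

-- the per-side value of A equals the per-side value of B
theorem per_side (l : List Int) (hne : l ≠ []) (s : Int) :
    (PySem.List.min? (l.map (fun x => (x - s) ^ 2)) (fun y => y)).getD 0
      = pvBest (PySem.List.sorted l (fun y => y)) s := by
  set srt := PySem.List.sorted l (fun y => y) with hsrt
  have hperm : srt.Perm l := PySem.List.sorted_perm l (fun y => y) false
  have hpair : srt.Pairwise (· ≤ ·) := PySem.List.sorted_pairwise l (fun y => y)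
  have hlen : srt.length = l.length := hperm.length_eq
  have hnel : 0 < srt.length := by
    rw [hlen]; exact List.length_pos_iff.mpr hne
  have hmemiff : ∀ x : Int, x ∈ srt ↔ x ∈ l := fun x => hperm.mem_iff
  have hchar := sorted_char srt hpair s
  set m := srt.length with hm
  obtain ⟨c, hc⟩ : ∃ c, srt.countP (fun t => decide (t < s)) = c := ⟨_, rfl⟩
  rw [hc] at hchar
  have hcle : c ≤ m := by rw [← hc, hm]; exact List.countP_le_length
  have hbis : pvBisect srt s 0 m = c :=
    pvBisect_eq srt s c hchar 0 m le_rfl (Nat.zero_le c) hcle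
  -- an element of srt, as a getD
  have hidx : ∀ x : Int, x ∈ srt → ∃ j, j < m ∧ srt.getD j 0 = x := by
    intro x hx
    rcases List.getElem_of_mem hx with ⟨j, hj, hxe⟩
    exact ⟨j, hj, by rw [List.getD_eq_getElem _ _ hj, hxe]⟩
  have hmemD : ∀ j, j < m → srt.getD j 0 ∈ l := by
    intro j hj
    rw [List.getD_eq_getElem _ _ hj]
    exact (hmemiff _).mp (List.getElem_mem hj)
  -- lower-bound property of pvBest, and membership of pvBest
  have key : pvBest srt s ∈ l.map (fun x => (x - s) ^ 2) ∧
      ∀ y ∈ l.map (fun x => (x - s) ^ 2), pvBest srt s ≤ y := by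
    rw [pvBest_def, ← hm, hbis]
    by_cases h0 : c = 0
    · rw [if_pos h0]
      constructor
      · exact List.mem_map.mpr ⟨srt.getD 0 0, hmemD 0 hnel, rfl⟩
      · intro y hy
        rcases List.mem_map.mp hy with ⟨x, hx, rfl⟩
        rcases hidx x ((hmemiff x).mpr hx) with ⟨j, hj, rfl⟩
        have hxs : ¬ (srt.getD j 0 < s) := fun h => by
          have := (hchar j hj).mp h; omega
        have h0s : ¬ (srt.getD 0 0 < s) := fun h => by
          have := (hchar 0 hnel).mp h; omega
        exact sq_mono_right s _ _ (by omega) (getD_mono srt hpair (Nat.zero_le j) hj)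
    · rw [if_neg h0]
      by_cases hcm : c = m
      · rw [if_pos hcm]
        constructor
        · exact List.mem_map.mpr ⟨srt.getD (m - 1) 0, hmemD (m - 1) (by omega), rfl⟩
        · intro y hy
          rcases List.mem_map.mp hy with ⟨x, hx, rfl⟩
          rcases hidx x ((hmemiff x).mpr hx) with ⟨j, hj, rfl⟩
          have hxs : srt.getD j 0 < s := (hchar j hj).mpr (by omega)
          have hm1 : srt.getD (m - 1) 0 < s := (hchar (m - 1) (by omega)).mpr (by omega)
          exact sq_mono_left s _ _ (by omega) (getD_mono srt hpair (by omega : j ≤ m - 1) (by omega))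
      · rw [if_neg hcm]
        have hc1 : c - 1 < m := by omega
        have hcm' : c < m := by omega
        have hlt : srt.getD (c - 1) 0 < s := (hchar (c - 1) hc1).mpr (by omega)
        have hge : ¬ (srt.getD c 0 < s) := fun h => by
          have := (hchar c hcm').mp h; omega
        constructor
        · rcases le_total ((srt.getD (c - 1) 0 - s) ^ 2) ((srt.getD c 0 - s) ^ 2) with h | h
          · rw [min_eq_left h]
            exact List.mem_map.mpr ⟨srt.getD (c - 1) 0, hmemD _ hc1, rfl⟩
          · rw [min_eq_right h]
            exact List.mem_map.mpr ⟨srt.getD c 0, hmemD _ hcm', rfl⟩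
        · intro y hy
          rcases List.mem_map.mp hy with ⟨x, hx, rfl⟩
          rcases hidx x ((hmemiff x).mpr hx) with ⟨j, hj, rfl⟩
          by_cases hjc : j < c
          · refine le_trans (min_le_left _ _) ?_
            have : srt.getD j 0 < s := (hchar j hj).mpr hjc
            exact sq_mono_left s _ _ (by omega) (getD_mono srt hpair (by omega : j ≤ c - 1) hc1)
          · refine le_trans (min_le_right _ _) ?_
            have : ¬ (srt.getD j 0 < s) := fun h => by
              have := (hchar j hj).mp h; omega
            exact sq_mono_right s _ _ (by omega) (getD_mono srt hpair (by omega : c ≤ j) hj)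
  exact min_getD_eq _ (by simp [hne]) _ key.1 key.2

-- ===== VERDICT (by name: the statement is the Claim_ definition above) =====
theorem compute_losses_py_spec : Claim_equal_compute_losses_py := by
  intro sides input_sides _hdom hpre
  unfold Spec_compute_losses_py compute_losses_py compute_losses_py_alt
  have hstep : (fun (loss : Int) (side : Int) =>
      loss + (PySem.List.min? (input_sides.map (fun input_side => (input_side - side) ^ 2))
        (fun y => y)).getD 0)
      = (fun (loss : Int) (side : Int) =>
          loss + pvBest (PySem.List.sorted input_sides (fun y => y)) side) := by
    funext loss side
    rw [per_side input_sides hpre side]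
  rw [hstep]
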